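-- pv_equiv track=rewrite | github.com/lambdaplus/python | merge_two_list.py | merge_loop
-- ===== SOURCE A (Python) =====
-- def merge_loop(l1, l2):
--     tmp = []
--     while len(l1) > 0 and len(l2) > 0:
--         if len(l1) < len(l2):
--             tmp.append(l1[0])
--             del l1[0]
--         else:
--             tmp.append(l2[0])
--             del l2[0]
--
--     tmp.extend(l1)
--     tmp.extend(l2)
--     return tmp
-- ===== SOURCE B (Python) =====
-- def merge_loop(l1, l2):
--     # A's loop always drains the currently-shorter list entirely (the length
--     # comparison never flips), so the result is just shorter-then-longer,
--     # ties putting l2 first. Closed form, O(n+m). Return value only: unlike A,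
--     # this does not empty l1/l2 in place.
--     if len(l1) < len(l2):
--         return l1 + l2
--     return l2 + l1
-- ===== Notes on version B (the rewrite author's own statement) =====
-- stated objective: faster
-- what changed: Replaced the while-loop that repeatedly deletes from the front of the shorter list with a closed form: the comparison never flips, so the result is shorter list ++ longer list (l2 first on ties); one concatenation, no mutation of the arguments (A empties them in place).
import Mathlib
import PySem

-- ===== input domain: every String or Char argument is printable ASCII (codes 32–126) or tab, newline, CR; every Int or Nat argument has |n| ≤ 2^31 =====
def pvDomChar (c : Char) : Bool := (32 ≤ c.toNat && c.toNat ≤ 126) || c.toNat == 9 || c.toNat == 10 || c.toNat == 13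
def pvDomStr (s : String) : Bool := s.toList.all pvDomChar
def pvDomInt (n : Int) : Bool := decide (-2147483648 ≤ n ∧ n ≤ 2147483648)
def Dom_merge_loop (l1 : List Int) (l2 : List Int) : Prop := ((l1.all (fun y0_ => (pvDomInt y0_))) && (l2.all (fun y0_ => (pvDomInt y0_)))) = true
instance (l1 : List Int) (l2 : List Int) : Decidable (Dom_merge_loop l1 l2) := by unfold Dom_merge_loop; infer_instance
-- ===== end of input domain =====

-- B replaces A's quadratic del-from-front while-loop with one closed-form concatenation
-- (return value only: A empties its argument lists in place, B does not mutate them).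

-- ===== PORT A =====
-- the while loop of A: state is (l1, l2, tmp); terminates since total length decreases
def mergeLoopWhile (l1 l2 tmp : List Int) : List Int :=
  if 0 < l1.length ∧ 0 < l2.length then
    if l1.length < l2.length then
      mergeLoopWhile (l1.drop 1) l2 (tmp ++ [l1.headI])   -- tmp.append(l1[0]); del l1[0]
    else
      mergeLoopWhile l1 (l2.drop 1) (tmp ++ [l2.headI])   -- tmp.append(l2[0]); del l2[0]
  else
    tmp ++ l1 ++ l2                                       -- tmp.extend(l1); tmp.extend(l2)
termination_by l1.length + l2.length
decreasing_by
  all_goals simp_all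

def merge_loop (l1 : List Int) (l2 : List Int) : List Int :=
  mergeLoopWhile l1 l2 []

-- ===== PORT B =====
def merge_loop_alt (l1 : List Int) (l2 : List Int) : List Int :=
  if l1.length < l2.length then l1 ++ l2 else l2 ++ l1

-- ===== PRECONDITION & SPEC =====
def Spec_merge_loop (l1 : List Int) (l2 : List Int) (out : List Int) : Prop := out = merge_loop_alt l1 l2
instance (l1 : List Int) (l2 : List Int) (out : List Int) : Decidable (Spec_merge_loop l1 l2 out) := by unfold Spec_merge_loop; infer_instance

-- ===== CLAIM (what is proved, stated in full; the proofs are below) =====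
def Claim_equal_merge_loop : Prop := ∀ (l1 : List Int) (l2 : List Int), Dom_merge_loop l1 l2 → Spec_merge_loop l1 l2 (merge_loop l1 l2)

-- ===== LEMMAS AND PROOFS =====
theorem mergeLoopWhile_closed (n : Nat) :
    ∀ (l1 l2 tmp : List Int), l1.length + l2.length ≤ n →
      mergeLoopWhile l1 l2 tmp =
        tmp ++ (if l1.length < l2.length then l1 ++ l2 else l2 ++ l1) := by
  induction n with
  | zero =>
    intro l1 l2 tmp h
    have h1 : l1 = [] := List.eq_nil_of_length_eq_zero (by omega)
    have h2 : l2 = [] := List.eq_nil_of_length_eq_zero (by omega)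
    subst h1; subst h2
    simp [mergeLoopWhile]
  | succ n ih =>
    intro l1 l2 tmp h
    rw [mergeLoopWhile]
    by_cases hb : 0 < l1.length ∧ 0 < l2.length
    · obtain ⟨x, l1', rfl⟩ : ∃ x l1', l1 = x :: l1' := by
        cases l1 with
        | nil => simp at hb
        | cons a t => exact ⟨a, t, rfl⟩
      obtain ⟨y, l2', rfl⟩ : ∃ y l2', l2 = y :: l2' := by
        cases l2 with
        | nil => simp at hb
        | cons a t => exact ⟨a, t, rfl⟩
      simp only [if_pos hb]
      by_cases hlt : (x :: l1').length < (y :: l2').length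
      · rw [if_pos hlt]
        rw [ih _ _ _ (by simp at h ⊢; omega)]
        have hlt' : ((x :: l1').drop 1).length < (y :: l2').length := by
          simp at hlt ⊢; omega
        simp only [if_pos hlt', if_pos hlt]
        simp
      · rw [if_neg hlt]
        rw [ih _ _ _ (by simp at h ⊢; omega)]
        have : ¬ (x :: l1').length < ((y :: l2').drop 1).length := by
          simp at hlt ⊢; omega
        rw [if_neg this, if_neg hlt]
        simp
    · rw [if_neg hb]
      rcases not_and_or.mp hb with h1 | h1 <;> simp only [Nat.not_lt, Nat.le_zero] at h1
      · have : l1 = [] := List.eq_nil_of_length_eq_zero (by omega)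
        subst this
        by_cases h2 : (0:Nat) < l2.length
        · simp [h2]
        · have : l2 = [] := List.eq_nil_of_length_eq_zero (by omega)
          subst this; simp
      · have : l2 = [] := List.eq_nil_of_length_eq_zero (by omega)
        subst this; simp

-- ===== VERDICT (by name: the statement is the Claim_ definition above) =====
theorem merge_loop_spec : Claim_equal_merge_loop := by
  intro l1 l2 _
  unfold Spec_merge_loop merge_loop merge_loop_alt
  rw [mergeLoopWhile_closed (l1.length + l2.length) l1 l2 [] le_rfl]
  simp
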